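-- pv_equiv track=rewrite | github.com/hong0002/Baekjoon | 기타/점 숫자.py | num_to_xy
-- ===== SOURCE A (Python) =====
-- def triangular(t):  # T_t = t*(t+1)//2
--     return t*(t+1)//2
--
-- def num_to_xy(n):
--     # find minimal k with T_k >= n
--     # k는 대략 sqrt(2n) 수준이라 선형보다 이분 탐색이 편함
--     lo, hi = 1, 200  # n < 10000이므로 k는 200 이하면 충분
--     while lo < hi:
--         mid = (lo + hi) // 2
--         if triangular(mid) >= n:
--             hi = mid
--         else:
--             lo = mid + 1
--     k = lo
--     x = n - triangular(k-1)
--     y = k + 1 - x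
--     return x, y
-- ===== SOURCE B (Python) =====
-- def triangular(t):  # T_t = t*(t+1)//2
--     return t*(t+1)//2
--
-- def num_to_xy(n):
--     # linear scan for the minimal k with T_k >= n, same cap 200 as A
--     k = 1
--     while k < 200 and triangular(k) < n:
--         k += 1
--     x = n - triangular(k-1)
--     y = k + 1 - x
--     return x, y
-- ===== Notes on version B (the rewrite author's own statement) =====
-- stated objective: simpler
-- what changed: the binary search over [1,200] for the minimal k with triangular(k) >= n is replaced by a single linear scan incrementing k while k < 200 and triangular(k) < n; x and y are computed unchanged
import Mathlib
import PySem

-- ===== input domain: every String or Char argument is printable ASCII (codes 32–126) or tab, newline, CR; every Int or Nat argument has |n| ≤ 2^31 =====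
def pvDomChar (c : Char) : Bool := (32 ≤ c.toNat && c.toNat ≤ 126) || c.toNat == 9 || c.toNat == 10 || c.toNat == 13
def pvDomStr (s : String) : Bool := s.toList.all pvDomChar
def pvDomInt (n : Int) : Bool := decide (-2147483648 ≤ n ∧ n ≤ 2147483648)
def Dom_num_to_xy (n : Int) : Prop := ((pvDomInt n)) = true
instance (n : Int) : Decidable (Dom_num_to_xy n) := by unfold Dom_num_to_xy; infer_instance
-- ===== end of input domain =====

-- B replaces A's binary search for the minimal k with triangular(k) >= n by a linear scan (same cap 200); simpler.


-- ===== PORT A =====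
def triangular (t : Int) : Int := PySem.Int.floordiv (t*(t+1)) 2

-- A's while-loop: binary search on [lo, hi] for the minimal k with triangular k ≥ n
def numToXyBsearch (n lo hi : Int) : Int :=
  if h : lo < hi then
    let mid := PySem.Int.floordiv (lo + hi) 2
    if triangular mid ≥ n then numToXyBsearch n lo mid
    else numToXyBsearch n (mid + 1) hi
  else lo
termination_by (hi - lo).toNat
decreasing_by
  · have h1 := PySem.Int.floordiv_mul_add_mod (lo + hi) 2
    have h2 := PySem.Int.mod_nonneg (lo + hi) (b := 2) (by norm_num)
    have h3 := PySem.Int.mod_lt (lo + hi) (b := 2) (by norm_num)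
    omega
  · have h1 := PySem.Int.floordiv_mul_add_mod (lo + hi) 2
    have h2 := PySem.Int.mod_nonneg (lo + hi) (b := 2) (by norm_num)
    have h3 := PySem.Int.mod_lt (lo + hi) (b := 2) (by norm_num)
    omega

def num_to_xy (n : Int) : Int × Int :=
  let k := numToXyBsearch n 1 200
  let x := n - triangular (k - 1)
  let y := k + 1 - x
  (x, y)

-- ===== PORT B =====
-- B's while-loop: linear scan, increment k while k < 200 and triangular k < n
def numToXyScan (n k : Int) : Int :=
  if h : k < 200 ∧ triangular k < n then numToXyScan n (k + 1)
  else k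
termination_by (200 - k).toNat
decreasing_by omega

def num_to_xy_alt (n : Int) : Int × Int :=
  let k := numToXyScan n 1
  let x := n - triangular (k - 1)
  let y := k + 1 - x
  (x, y)

-- ===== PRECONDITION & SPEC =====
def Spec_num_to_xy (n : Int) (out : Int × Int) : Prop := out = num_to_xy_alt n
instance (n : Int) (out : Int × Int) : Decidable (Spec_num_to_xy n out) := by unfold Spec_num_to_xy; infer_instance

-- ===== CLAIM (what is proved, stated in full; the proofs are below) =====
def Claim_equal_num_to_xy : Prop := ∀ (n : Int), Dom_num_to_xy n → Spec_num_to_xy n (num_to_xy n)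

-- ===== LEMMAS AND PROOFS =====

-- Both loops compute the same k: the unique k with 1 ≤ k ≤ 200, triangular j < n for all 1 ≤ j < k,
-- and (n ≤ triangular k or k = 200).
def KSpec (n k : Int) : Prop :=
  1 ≤ k ∧ k ≤ 200 ∧ (∀ j, 1 ≤ j → j < k → triangular j < n) ∧ (n ≤ triangular k ∨ k = 200)

theorem triangular_mono {a b : Int} (ha : 0 ≤ a) (hab : a ≤ b) : triangular a ≤ triangular b := by
  unfold triangular
  rw [PySem.Int.floordiv_eq_ediv_of_pos (by norm_num), PySem.Int.floordiv_eq_ediv_of_pos (by norm_num)]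
  apply Int.ediv_le_ediv (by norm_num)
  nlinarith

theorem kspec_unique {n k1 k2 : Int} (h1 : KSpec n k1) (h2 : KSpec n k2) : k1 = k2 := by
  obtain ⟨a1, b1, f1, g1⟩ := h1
  obtain ⟨a2, b2, f2, g2⟩ := h2
  by_contra hne
  rcases lt_or_gt_of_ne hne with h | h
  · have hlt := f2 k1 a1 h
    rcases g1 with hg | hg
    · omega
    · omega
  · have hlt := f1 k2 a2 h
    rcases g2 with hg | hg
    · omega
    · omega

theorem bsearch_kspec (n : Int) : ∀ fuel : Nat, ∀ lo hi : Int,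
    (hi - lo).toNat ≤ fuel →
    1 ≤ lo → lo ≤ hi → hi ≤ 200 →
    (∀ j, 1 ≤ j → j < lo → triangular j < n) →
    (n ≤ triangular hi ∨ hi = 200) →
    KSpec n (numToXyBsearch n lo hi) := by
  intro fuel
  induction fuel with
  | zero =>
    intro lo hi hf h1 h2 h3 h4 h5
    have hle : hi ≤ lo := by omega
    rw [numToXyBsearch, dif_neg (by omega)]
    have : lo = hi := by omega
    exact ⟨h1, by omega, h4, by omega ▸ (this ▸ h5)⟩
  | succ m ih =>
    intro lo hi hf h1 h2 h3 h4 h5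
    rw [numToXyBsearch]
    by_cases hlt : lo < hi
    · rw [dif_pos hlt]
      have hq1 := PySem.Int.floordiv_mul_add_mod (lo + hi) 2
      have hq2 := PySem.Int.mod_nonneg (lo + hi) (b := 2) (by norm_num)
      have hq3 := PySem.Int.mod_lt (lo + hi) (b := 2) (by norm_num)
      set mid := PySem.Int.floordiv (lo + hi) 2 with hm
      by_cases hge : triangular mid ≥ n
      · rw [if_pos hge]
        exact ih lo mid (by omega) h1 (by omega) (by omega) h4 (Or.inl hge)
      · rw [if_neg hge]
        refine ih (mid + 1) hi (by omega) (by omega) (by omega) h3 ?_ h5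
        intro j hj1 hj2
        by_cases hjlo : j < lo
        · exact h4 j hj1 hjlo
        · have : triangular j ≤ triangular mid := triangular_mono (by omega) (by omega)
          omega
    · rw [dif_neg hlt]
      have : lo = hi := by omega
      exact ⟨h1, by omega, h4, by omega ▸ (this ▸ h5)⟩

theorem scan_kspec (n : Int) : ∀ fuel : Nat, ∀ k : Int,
    (200 - k).toNat ≤ fuel →
    1 ≤ k → k ≤ 200 →
    (∀ j, 1 ≤ j → j < k → triangular j < n) →
    KSpec n (numToXyScan n k) := by
  intro fuel
  induction fuel with
  | zero =>
    intro k hf h1 h2 h3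
    have : k = 200 := by omega
    rw [numToXyScan, dif_neg (by omega)]
    exact ⟨h1, h2, h3, Or.inr this⟩
  | succ m ih =>
    intro k hf h1 h2 h3
    rw [numToXyScan]
    by_cases hc : k < 200 ∧ triangular k < n
    · rw [dif_pos hc]
      refine ih (k + 1) (by omega) (by omega) (by omega) ?_
      intro j hj1 hj2
      by_cases hjk : j < k
      · exact h3 j hj1 hjk
      · have : j = k := by omega
        exact this ▸ hc.2
    · rw [dif_neg hc]
      exact ⟨h1, h2, h3, by omega⟩

theorem loops_eq (n : Int) : numToXyBsearch n 1 200 = numToXyScan n 1 := by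
  apply kspec_unique (n := n)
  · exact bsearch_kspec n 199 1 200 (by norm_num) (by norm_num) (by norm_num) (by norm_num)
      (by intro j h1 h2; omega) (Or.inr rfl)
  · exact scan_kspec n 199 1 (by norm_num) (by norm_num) (by norm_num)
      (by intro j h1 h2; omega)

-- ===== VERDICT (by name: the statement is the Claim_ definition above) =====
theorem num_to_xy_spec : Claim_equal_num_to_xy := by
  intro n _
  unfold Spec_num_to_xy num_to_xy num_to_xy_alt
  rw [loops_eq]
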